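-- pv_equiv track=rewrite | github.com/9sanha/san_baeck | LV.5/no.8958.py | ox_print
-- ===== SOURCE A (Python) =====
-- def ox_print(arr):
--     sum = 0
--     plus = 0
--     for i in arr:
--         if i =='O':
--             plus+=1
--             sum += plus
--         else:
--             plus = 0
--     return sum
-- ===== SOURCE B (Python) =====
-- def ox_print(arr):
--     # Two phases: collect lengths of maximal 'O' runs, then sum triangular numbers.
--     runs = []
--     n = 0
--     for i in arr:
--         if i == 'O':
--             n += 1
--         else:
--             if n != 0:
--                 runs.append(n)
--             n = 0
--     if n != 0:
--         runs.append(n)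
--     return sum(k * (k + 1) // 2 for k in runs)
-- ===== Notes on version B (the rewrite author's own statement) =====
-- stated objective: alternative
-- what changed: B first splits the input into maximal 'O'-run lengths and then sums each run's closed-form triangular contribution k*(k+1)//2, instead of A's running per-element accumulator.
import Mathlib
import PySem

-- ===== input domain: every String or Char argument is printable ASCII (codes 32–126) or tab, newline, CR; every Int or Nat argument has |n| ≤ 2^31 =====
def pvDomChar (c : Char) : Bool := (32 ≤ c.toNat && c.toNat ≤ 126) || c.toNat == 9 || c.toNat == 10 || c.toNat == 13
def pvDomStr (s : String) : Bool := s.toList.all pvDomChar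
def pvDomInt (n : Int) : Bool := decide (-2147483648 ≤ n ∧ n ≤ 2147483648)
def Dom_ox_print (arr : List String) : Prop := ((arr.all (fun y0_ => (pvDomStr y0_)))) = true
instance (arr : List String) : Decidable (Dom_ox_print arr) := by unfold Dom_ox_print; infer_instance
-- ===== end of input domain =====

-- B replaces A's running per-element accumulator by a two-phase run-length decomposition
-- with a closed-form triangular sum per 'O'-run (objective: alternative, same O(n) cost).

-- ===== PORT A =====
def ox_print (arr : List String) : Int :=
  (arr.foldl (fun (st : Int × Int) i =>
      if i = "O" then (st.1 + (st.2 + 1), st.2 + 1) else (st.1, 0)) (0, 0)).1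

-- ===== PORT B =====
-- k*(k+1)//2, Python floor division
def oxTri (k : Int) : Int := PySem.Int.floordiv (k * (k + 1)) 2

def ox_print_alt (arr : List String) : Int :=
  let st := arr.foldl (fun (st : List Int × Int) i =>
      if i = "O" then (st.1, st.2 + 1)
      else ((if st.2 ≠ 0 then st.1 ++ [st.2] else st.1), 0)) ([], 0)
  let runs := if st.2 ≠ 0 then st.1 ++ [st.2] else st.1
  runs.foldl (fun acc k => acc + oxTri k) 0

-- ===== PRECONDITION & SPEC =====
def Spec_ox_print (arr : List String) (out : Int) : Prop := out = ox_print_alt arr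
instance (arr : List String) (out : Int) : Decidable (Spec_ox_print arr out) := by unfold Spec_ox_print; infer_instance

-- ===== CLAIM (what is proved, stated in full; the proofs are below) =====
def Claim_equal_ox_print : Prop := ∀ (arr : List String), Dom_ox_print arr → Spec_ox_print arr (ox_print arr)

-- ===== LEMMAS AND PROOFS =====
def oxSumTri (rs : List Int) : Int := rs.foldl (fun acc k => acc + oxTri k) 0

theorem oxSumTri_append (rs : List Int) (k : Int) :
    oxSumTri (rs ++ [k]) = oxSumTri rs + oxTri k := by
  show (rs ++ [k]).foldl _ 0 = _
  rw [List.foldl_append]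
  rfl

theorem oxTri_zero : oxTri 0 = 0 := by decide

theorem oxTri_succ (n : Int) (_hn : 0 ≤ n) : oxTri (n + 1) = oxTri n + (n + 1) := by
  unfold oxTri
  rw [PySem.Int.floordiv_eq_ediv_of_pos (by norm_num),
      PySem.Int.floordiv_eq_ediv_of_pos (by norm_num)]
  have h2 : (2 : Int) ∣ n * (n + 1) := Int.even_mul_succ_self n |>.two_dvd
  obtain ⟨m, hm⟩ := h2
  have : (n + 1) * (n + 1 + 1) = 2 * (m + (n + 1)) := by linear_combination hm
  rw [hm, this, Int.mul_ediv_cancel_left _ (by norm_num), Int.mul_ediv_cancel_left _ (by norm_num)]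

-- main invariant: A's fold state (s, p) corresponds to B's (rs, n) with p = n ≥ 0 and s = sumTri rs + tri n
theorem ox_inv (l : List String) (s n : Int) (rs : List Int) (hn : 0 ≤ n)
    (hs : s = oxSumTri rs + oxTri n) :
    (l.foldl (fun (st : Int × Int) i =>
        if i = "O" then (st.1 + (st.2 + 1), st.2 + 1) else (st.1, 0)) (s, n)).1
    = (let st := l.foldl (fun (st : List Int × Int) i =>
          if i = "O" then (st.1, st.2 + 1)
          else ((if st.2 ≠ 0 then st.1 ++ [st.2] else st.1), 0)) (rs, n)
       oxSumTri (if st.2 ≠ 0 then st.1 ++ [st.2] else st.1)) := by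
  induction l generalizing s n rs with
  | nil =>
    by_cases h : n = 0 <;> simp [h, hs, oxTri_zero, oxSumTri_append]
  | cons x xs ih =>
    by_cases hx : x = "O"
    · simp only [List.foldl, hx]
      exact ih (s + (n + 1)) (n + 1) rs (by omega) (by rw [hs, oxTri_succ n hn]; ring)
    · simp only [List.foldl, hx]
      by_cases h : n = 0
      · exact ih s 0 (if n ≠ 0 then rs ++ [n] else rs) le_rfl (by simp [h, hs, oxTri_zero])
      · exact ih s 0 (if n ≠ 0 then rs ++ [n] else rs)  le_rfl
          (by simp [h, hs, oxSumTri_append, oxTri_zero])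

-- ===== VERDICT (by name: the statement is the Claim_ definition above) =====
theorem ox_print_spec : Claim_equal_ox_print := by
  intro arr _
  show ox_print arr = ox_print_alt arr
  unfold ox_print ox_print_alt
  simpa [oxSumTri] using ox_inv arr 0 0 [] le_rfl (by simp [oxSumTri, oxTri_zero])
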